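-- pv_equiv track=rewrite | github.com/Adam-Smith-2001/Multi-field-astrophysical-profiles-and-Screening | BBQ energy-minimiser/Stars/Star solver.py | _center_out_order
-- ===== SOURCE A (Python) =====
-- def _center_out_order(n, i0):
--     order = [i0]
--     for k in range(1, n):
--         j1 = i0 + k
--         j2 = i0 - k
--         if j1 < n: order.append(j1)
--         if j2 >= 0: order.append(j2)
--         if len(order) >= n: break
--     return order[:n]
-- ===== SOURCE B (Python) =====
-- def _center_out_order(n, i0):
--     up = [i0 + k for k in range(1, n) if i0 + k < n]
--     down = [i0 - k for k in range(1, n) if i0 - k >= 0]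
--     order = [i0]
--     for a, b in zip(up, down):
--         order.append(a)
--         order.append(b)
--     m = min(len(up), len(down))
--     order.extend(up[m:])
--     order.extend(down[m:])
--     return order[:n]
-- ===== Notes on version B (the rewrite author's own statement) =====
-- stated objective: alternative
-- what changed: Replaced the single stateful loop with break/length checks by first building the two filtered arms (upward and downward indices) as comprehensions and then zip-interleaving them after the center, slicing to n at the end.
import Mathlib
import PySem

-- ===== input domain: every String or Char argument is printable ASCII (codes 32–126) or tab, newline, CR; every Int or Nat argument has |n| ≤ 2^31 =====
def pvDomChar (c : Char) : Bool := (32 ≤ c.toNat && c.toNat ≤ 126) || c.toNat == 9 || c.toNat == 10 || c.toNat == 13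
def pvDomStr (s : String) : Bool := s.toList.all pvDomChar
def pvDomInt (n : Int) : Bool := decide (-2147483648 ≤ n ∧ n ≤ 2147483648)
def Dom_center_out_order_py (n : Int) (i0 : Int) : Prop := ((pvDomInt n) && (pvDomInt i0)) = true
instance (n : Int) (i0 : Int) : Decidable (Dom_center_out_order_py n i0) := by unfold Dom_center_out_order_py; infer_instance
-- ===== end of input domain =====

-- B builds the two filtered arms as comprehensions and zip-interleaves them after the center
-- instead of A's single stateful loop with break; same cost, different decomposition.

-- ===== PORT A =====
-- the 'for k in range(1, n)' loop with its early 'break'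
def cooA_loop (n : Int) (i0 : Int) : List Int → List Int → List Int
  | [], order => order
  | k :: ks, order =>
    let order := if i0 + k < n then order ++ [i0 + k] else order
    let order := if 0 ≤ i0 - k then order ++ [i0 - k] else order
    if n ≤ (order.length : Int) then order else cooA_loop n i0 ks order

def center_out_order_py (n : Int) (i0 : Int) : List Int :=
  PySem.List.slice (cooA_loop n i0 (PySem.List.pyRange 1 n 1) [i0]) none (some n)

-- ===== PORT B =====
def center_out_order_py_alt (n : Int) (i0 : Int) : List Int :=
  let up := ((PySem.List.pyRange 1 n 1).filter (fun k => decide (i0 + k < n))).map (fun k => i0 + k)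
  let down := ((PySem.List.pyRange 1 n 1).filter (fun k => decide (0 ≤ i0 - k))).map (fun k => i0 - k)
  let order := (up.zip down).foldl (fun o ab => o ++ [ab.1] ++ [ab.2]) [i0]
  let m := min up.length down.length
  let order := order ++ up.drop m ++ down.drop m
  PySem.List.slice order none (some n)

-- ===== PRECONDITION & SPEC =====
def Spec_center_out_order_py (n : Int) (i0 : Int) (out : List Int) : Prop := out = center_out_order_py_alt n i0
instance (n : Int) (i0 : Int) (out : List Int) : Decidable (Spec_center_out_order_py n i0 out) := by unfold Spec_center_out_order_py; infer_instance

-- ===== CLAIM (what is proved, stated in full; the proofs are below) =====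
def Claim_equal_center_out_order_py : Prop := ∀ (n : Int) (i0 : Int), Dom_center_out_order_py n i0 → Spec_center_out_order_py n i0 (center_out_order_py n i0)

-- ===== LEMMAS AND PROOFS =====

-- A's loop without the break (ghost definition, proofs only)
def cooNB (n : Int) (i0 : Int) : List Int → List Int → List Int
  | [], order => order
  | k :: ks, order =>
    let order := if i0 + k < n then order ++ [i0 + k] else order
    let order := if 0 ≤ i0 - k then order ++ [i0 - k] else order
    cooNB n i0 ks order

-- B's combining step as a function of the two arms (ghost)
def bComb (order up down : List Int) : List Int :=
  ((up.zip down).foldl (fun o ab => o ++ [ab.1] ++ [ab.2]) order)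
    ++ up.drop (min up.length down.length) ++ down.drop (min up.length down.length)

theorem bComb_nil_right (o x : List Int) : bComb o x [] = o ++ x := by
  simp [bComb]

theorem bComb_nil_left (o y : List Int) : bComb o [] y = o ++ y := by
  simp [bComb]

theorem bComb_cons (o x y : List Int) (a b : Int) :
    bComb o (a :: x) (b :: y) = bComb (o ++ [a] ++ [b]) x y := by
  simp [bComb, Nat.succ_min_succ, List.append_assoc]

theorem cooNB_extends (n i0 : Int) (ks : List Int) (o : List Int) :
    ∃ t, cooNB n i0 ks o = o ++ t := by
  induction ks generalizing o with
  | nil => exact ⟨[], by simp [cooNB]⟩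
  | cons k ks ih =>
    simp only [cooNB]
    split_ifs with h1 h2 h2
    · obtain ⟨t, ht⟩ := ih (o ++ [i0 + k, i0 - k])
      exact ⟨(i0 + k) :: (i0 - k) :: t, by simpa using ht⟩
    · obtain ⟨t, ht⟩ := ih (o ++ [i0 - k])
      exact ⟨(i0 - k) :: t, by simpa using ht⟩
    · obtain ⟨t, ht⟩ := ih (o ++ [i0 + k])
      exact ⟨(i0 + k) :: t, by simpa using ht⟩
    · exact ih o

-- the break only truncates past what [:n] keeps
theorem cooA_prefix (n i0 : Int) (ks : List Int) (o : List Int) :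
    ∃ t, cooNB n i0 ks o = cooA_loop n i0 ks o ++ t ∧
      (t = [] ∨ n ≤ ((cooA_loop n i0 ks o).length : Int)) := by
  induction ks generalizing o with
  | nil => exact ⟨[], by simp [cooNB, cooA_loop]⟩
  | cons k ks ih =>
    simp only [cooNB, cooA_loop]
    set o2 := (if 0 ≤ i0 - k then
        (if i0 + k < n then o ++ [i0 + k] else o) ++ [i0 - k]
      else (if i0 + k < n then o ++ [i0 + k] else o)) with ho2
    by_cases hb : n ≤ (o2.length : Int)
    · obtain ⟨t, ht⟩ := cooNB_extends n i0 ks o2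
      refine ⟨t, ?_, Or.inr ?_⟩ <;> simp [hb, ht]
    · obtain ⟨t, ht, hcase⟩ := ih o2
      exact ⟨t, by simp [hb, ht], by simpa [hb] using hcase⟩

-- main interleaving lemma: the no-break loop is exactly B's zip-interleave of the two arms
theorem cooNB_eq_bComb (n i0 : Int) (ks : List Int) (o : List Int)
    (hs : List.Pairwise (· ≤ ·) ks) :
    cooNB n i0 ks o =
      bComb o ((ks.filter (fun k => decide (i0 + k < n))).map (fun k => i0 + k))
              ((ks.filter (fun k => decide (0 ≤ i0 - k))).map (fun k => i0 - k)) := by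
  induction ks generalizing o with
  | nil => simp [cooNB, bComb]
  | cons k ks ih =>
    obtain ⟨hk, hs'⟩ := List.pairwise_cons.mp hs
    simp only [cooNB, List.filter_cons, decide_eq_true_eq]
    by_cases h1 : i0 + k < n <;> by_cases h2 : 0 ≤ i0 - k
    · rw [if_pos h1, if_pos h2, if_pos h1, if_pos h2, List.map_cons, List.map_cons,
        bComb_cons, ih _ hs']
    · have hall : ks.filter (fun x => decide (0 ≤ i0 - x)) = [] := by
        rw [List.filter_eq_nil_iff]
        intro x hx
        have := hk x hx
        simp only [decide_eq_true_eq]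
        omega
      rw [if_pos h1, if_neg h2, if_pos h1, if_neg h2, ih _ hs', hall]
      rw [List.map_nil, List.map_cons, bComb_nil_right, bComb_nil_right]
      simp [List.append_assoc]
    · have hall : ks.filter (fun x => decide (i0 + x < n)) = [] := by
        rw [List.filter_eq_nil_iff]
        intro x hx
        have := hk x hx
        simp only [decide_eq_true_eq]
        omega
      rw [if_neg h1, if_pos h2, if_neg h1, if_pos h2, ih _ hs', hall]
      rw [List.map_nil, List.map_cons, bComb_nil_left, bComb_nil_left]
      simp [List.append_assoc]
    · have hall1 : ks.filter (fun x => decide (i0 + x < n)) = [] := by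
        rw [List.filter_eq_nil_iff]; intro x hx; have := hk x hx
        simp only [decide_eq_true_eq]; omega
      have hall2 : ks.filter (fun x => decide (0 ≤ i0 - x)) = [] := by
        rw [List.filter_eq_nil_iff]; intro x hx; have := hk x hx
        simp only [decide_eq_true_eq]; omega
      rw [if_neg h1, if_neg h2, if_neg h1, if_neg h2, ih _ hs', hall1, hall2]

-- ===== VERDICT (by name: the statement is the Claim_ definition above) =====
theorem center_out_order_py_spec : Claim_equal_center_out_order_py := by
  intro n i0 _
  unfold Spec_center_out_order_py center_out_order_py center_out_order_py_alt
  by_cases hn : 0 ≤ n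
  · rw [PySem.List.slice_to _ hn, PySem.List.slice_to _ hn]
    have hpw : List.Pairwise (· ≤ ·) (PySem.List.pyRange 1 n 1) :=
      List.Pairwise.imp (fun h => Int.le_of_lt h) (PySem.List.pairwise_lt_pyRange_one 1 n)
    have hnb := cooNB_eq_bComb n i0 (PySem.List.pyRange 1 n 1) [i0] hpw
    obtain ⟨t, ht, hcase⟩ := cooA_prefix n i0 (PySem.List.pyRange 1 n 1) [i0]
    have hb : bComb [i0]
        (((PySem.List.pyRange 1 n 1).filter (fun k => decide (i0 + k < n))).map (fun k => i0 + k))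
        (((PySem.List.pyRange 1 n 1).filter (fun k => decide (0 ≤ i0 - k))).map (fun k => i0 - k))
        = cooA_loop n i0 (PySem.List.pyRange 1 n 1) [i0] ++ t := by
      rw [← hnb, ht]
    simp only [bComb] at hb
    rw [hb]
    rcases hcase with h | h
    · simp [h]
    · rw [List.take_append_of_le_length]
      omega
  · have hr : PySem.List.pyRange 1 n 1 = [] :=
      PySem.List.pyRange_one_eq_nil (by omega)
    simp [hr, cooA_loop]
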